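-- pv_equiv track=rewrite | github.com/jerry-samek/tick-frame-space | experiments/64_109_three_body_tree/v15/macro_bodies.py | unwrap_coords
-- ===== SOURCE A (Python) =====
-- def unwrap_coords(coord_history, side):
--     if len(coord_history) < 2:
--         return coord_history
--     result = [coord_history[0]]
--     cumulative = [coord_history[0][1], coord_history[0][2], coord_history[0][3]]
--     for i in range(1, len(coord_history)):
--         tick = coord_history[i][0]
--         for dim in range(3):
--             raw = coord_history[i][dim + 1]
--             prev = coord_history[i - 1][dim + 1]
--             delta = raw - prev
--             if delta > side // 2:
--                 delta -= side
--             elif delta < -(side // 2):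
--                 delta += side
--             cumulative[dim] += delta
--         result.append((tick, cumulative[0], cumulative[1], cumulative[2]))
--     return result
-- ===== SOURCE B (Python) =====
-- from itertools import accumulate
--
--
-- def unwrap_coords(coord_history, side):
--     if len(coord_history) < 2:
--         return coord_history
--     half = side // 2
--
--     def wrap(d):
--         if d > half:
--             return d - side
--         if d < -half:
--             return d + side
--         return d
--
--     ticks = [row[0] for row in coord_history]
--     series = []
--     for dim in (1, 2, 3):
--         col = [row[dim] for row in coord_history]
--         deltas = [wrap(b - a) for a, b in zip(col, col[1:])]
--         series.append(list(accumulate(deltas, initial=col[0])))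
--     return [coord_history[0]] + list(
--         zip(ticks[1:], series[0][1:], series[1][1:], series[2][1:])
--     )
-- ===== Notes on version B (the rewrite author's own statement) =====
-- stated objective: alternative
-- what changed: A threads one running cumulative triple through an index loop over frames; B first builds, per dimension, the column, its minimum-image-corrected delta table, and the prefix-sum series (itertools.accumulate), then zips the tick column with the three series.
import Mathlib
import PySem

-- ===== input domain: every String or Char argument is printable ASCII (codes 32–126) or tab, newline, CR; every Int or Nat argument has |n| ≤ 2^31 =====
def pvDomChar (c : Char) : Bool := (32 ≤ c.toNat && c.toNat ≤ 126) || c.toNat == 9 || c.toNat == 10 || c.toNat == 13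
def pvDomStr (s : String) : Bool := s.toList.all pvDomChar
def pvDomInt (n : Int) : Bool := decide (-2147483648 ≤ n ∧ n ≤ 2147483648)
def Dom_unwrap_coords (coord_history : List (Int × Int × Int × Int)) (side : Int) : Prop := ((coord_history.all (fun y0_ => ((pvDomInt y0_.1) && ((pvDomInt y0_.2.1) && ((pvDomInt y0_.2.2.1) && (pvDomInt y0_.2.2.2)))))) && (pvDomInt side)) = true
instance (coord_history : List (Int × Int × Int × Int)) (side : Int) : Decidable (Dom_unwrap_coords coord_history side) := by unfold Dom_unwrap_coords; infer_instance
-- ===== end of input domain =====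

-- B replaces A's index loop with three per-dimension delta tables prefix-summed and zipped
-- back with the tick column (objective: alternative decomposition, same cost).

-- ===== PORT A =====
-- loop body of `for i in range(1, len(coord_history))`, the inner `for dim in range(3)`
-- unrolled into the three sequential cumulative updates it performs;
-- pyGetD is exact here: every index A uses is in range on the taken branch
def pvStepA (coord_history : List (Int × Int × Int × Int)) (side : Int)
    (st : List (Int × Int × Int × Int) × (Int × Int × Int)) (i : Int) :
    List (Int × Int × Int × Int) × (Int × Int × Int) :=
  let cur := PySem.List.pyGetD coord_history i (0, 0, 0, 0)
  let prev := PySem.List.pyGetD coord_history (i - 1) (0, 0, 0, 0)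
  let tick := cur.1
  let d1 := cur.2.1 - prev.2.1
  let d1 := if d1 > PySem.Int.floordiv side 2 then d1 - side
            else if d1 < -(PySem.Int.floordiv side 2) then d1 + side else d1
  let d2 := cur.2.2.1 - prev.2.2.1
  let d2 := if d2 > PySem.Int.floordiv side 2 then d2 - side
            else if d2 < -(PySem.Int.floordiv side 2) then d2 + side else d2
  let d3 := cur.2.2.2 - prev.2.2.2
  let d3 := if d3 > PySem.Int.floordiv side 2 then d3 - side
            else if d3 < -(PySem.Int.floordiv side 2) then d3 + side else d3
  let cum := (st.2.1 + d1, st.2.2.1 + d2, st.2.2.2 + d3)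
  (st.1 ++ [(tick, cum.1, cum.2.1, cum.2.2)], cum)

def unwrap_coords (coord_history : List (Int × Int × Int × Int)) (side : Int) :
    List (Int × Int × Int × Int) :=
  if coord_history.length < 2 then coord_history
  else
    let h0 := PySem.List.pyGetD coord_history 0 (0, 0, 0, 0)
    ((PySem.List.pyRange 1 (coord_history.length : Int) 1).foldl
      (pvStepA coord_history side)
      ([h0], (h0.2.1, h0.2.2.1, h0.2.2.2))).1

-- ===== PORT B =====
def pvWrap (side half d : Int) : Int :=
  if d > half then d - side
  else if d < -half then d + side
  else d

-- [wrap(b - a) for a, b in zip(col, col[1:])]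
def pvDeltas (side half : Int) (col : List Int) : List Int :=
  (col.zip (col.drop 1)).map (fun p => pvWrap side half (p.2 - p.1))

-- itertools.accumulate(deltas, initial=c0) is List.scanl (+) c0 deltas;
-- the [1:] slices are List.drop 1 (exact: the index is the nonnegative literal 1)
def unwrap_coords_alt (coord_history : List (Int × Int × Int × Int)) (side : Int) :
    List (Int × Int × Int × Int) :=
  if coord_history.length < 2 then coord_history
  else
    let half := PySem.Int.floordiv side 2
    let ticks := coord_history.map (fun r => r.1)
    let colx := coord_history.map (fun r => r.2.1)
    let coly := coord_history.map (fun r => r.2.2.1)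
    let colz := coord_history.map (fun r => r.2.2.2)
    let sx := List.scanl (· + ·) colx.headI (pvDeltas side half colx)
    let sy := List.scanl (· + ·) coly.headI (pvDeltas side half coly)
    let sz := List.scanl (· + ·) colz.headI (pvDeltas side half colz)
    coord_history.headI ::
      List.zipWith (fun (tx : Int × Int) (yz : Int × Int) => (tx.1, tx.2, yz.1, yz.2))
        ((ticks.drop 1).zip (sx.drop 1)) ((sy.drop 1).zip (sz.drop 1))

-- ===== PRECONDITION & SPEC =====
def Spec_unwrap_coords (coord_history : List (Int × Int × Int × Int)) (side : Int) (out : List (Int × Int × Int × Int)) : Prop := out = unwrap_coords_alt coord_history side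
instance (coord_history : List (Int × Int × Int × Int)) (side : Int) (out : List (Int × Int × Int × Int)) : Decidable (Spec_unwrap_coords coord_history side out) := by unfold Spec_unwrap_coords; infer_instance

-- ===== CLAIM (what is proved, stated in full; the proofs are below) =====
def Claim_equal_unwrap_coords : Prop := ∀ (coord_history : List (Int × Int × Int × Int)) (side : Int), Dom_unwrap_coords coord_history side → Spec_unwrap_coords coord_history side (unwrap_coords coord_history side)

-- ===== LEMMAS AND PROOFS =====

-- common reference recursion: both ports are shown equal to `prev₀ :: pvGo …`
def pvGo (side half : Int) (prev : Int × Int × Int × Int) (c1 c2 c3 : Int) :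
    List (Int × Int × Int × Int) → List (Int × Int × Int × Int)
  | [] => []
  | c :: rest =>
    (c.1, c1 + pvWrap side half (c.2.1 - prev.2.1),
          c2 + pvWrap side half (c.2.2.1 - prev.2.2.1),
          c3 + pvWrap side half (c.2.2.2 - prev.2.2.2)) ::
    pvGo side half c (c1 + pvWrap side half (c.2.1 - prev.2.1))
      (c2 + pvWrap side half (c.2.2.1 - prev.2.2.1))
      (c3 + pvWrap side half (c.2.2.2 - prev.2.2.2)) rest

lemma pvDeltas_cons (side half a b : Int) (l : List Int) :
    pvDeltas side half (a :: b :: l) = pvWrap side half (b - a) :: pvDeltas side half (b :: l) := by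
  simp [pvDeltas]

lemma scanl_head_drop {α β : Type} (f : α → β → α) (b : α) (l : List β) :
    List.scanl f b l = b :: (List.scanl f b l).drop 1 := by
  cases l <;> simp [List.scanl]

lemma loopA (side : Int) : ∀ (rest pre : List (Int × Int × Int × Int))
    (prev : Int × Int × Int × Int) (acc : List (Int × Int × Int × Int)) (c1 c2 c3 : Int),
    ((PySem.List.pyRange ((pre.length : Int) + 1) (((pre ++ prev :: rest).length : Int)) 1).foldl
      (pvStepA (pre ++ prev :: rest) side) (acc, (c1, c2, c3))).1
    = acc ++ pvGo side (PySem.Int.floordiv side 2) prev c1 c2 c3 rest := by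
  intro rest
  induction rest with
  | nil =>
    intro pre prev acc c1 c2 c3
    rw [PySem.List.pyRange_one_eq_nil (by simp)]
    simp [pvGo]
  | cons c rest' ih =>
    intro pre prev acc c1 c2 c3
    rw [PySem.List.pyRange_one_cons (by simp)]
    rw [List.foldl_cons]
    have hcur : PySem.List.pyGetD (pre ++ prev :: c :: rest') ((pre.length : Int) + 1) (0, 0, 0, 0) = c := by
      have hi : ((pre.length : Int) + 1) = ((pre.length + 1 : Nat) : Int) := by omega
      rw [hi, PySem.List.pyGetD_natCast]
      simp [List.getD]
    have hprev : PySem.List.pyGetD (pre ++ prev :: c :: rest') ((pre.length : Int) + 1 - 1) (0, 0, 0, 0) = prev := by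
      have hi : ((pre.length : Int) + 1 - 1) = ((pre.length : Nat) : Int) := by omega
      rw [hi, PySem.List.pyGetD_natCast]
      simp [List.getD]
    have hstep : pvStepA (pre ++ prev :: c :: rest') side (acc, (c1, c2, c3)) ((pre.length : Int) + 1)
        = (acc ++ [(c.1, c1 + pvWrap side (PySem.Int.floordiv side 2) (c.2.1 - prev.2.1),
                          c2 + pvWrap side (PySem.Int.floordiv side 2) (c.2.2.1 - prev.2.2.1),
                          c3 + pvWrap side (PySem.Int.floordiv side 2) (c.2.2.2 - prev.2.2.2))],
            (c1 + pvWrap side (PySem.Int.floordiv side 2) (c.2.1 - prev.2.1),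
             c2 + pvWrap side (PySem.Int.floordiv side 2) (c.2.2.1 - prev.2.2.1),
             c3 + pvWrap side (PySem.Int.floordiv side 2) (c.2.2.2 - prev.2.2.2))) := by
      simp only [pvStepA, hcur, hprev, pvWrap]
    rw [hstep]
    have hre : pre ++ prev :: c :: rest' = (pre ++ [prev]) ++ c :: rest' := by simp
    have hlen : (pre.length : Int) + 1 + 1 = (((pre ++ [prev]).length : Nat) : Int) + 1 := by
      simp only [List.length_append, List.length_singleton]
      omega
    rw [hre, hlen]
    rw [ih (pre ++ [prev]) c _ _ _ _]
    simp [pvGo]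

lemma zipB (side half : Int) : ∀ (t : List (Int × Int × Int × Int))
    (prev : Int × Int × Int × Int) (c1 c2 c3 : Int),
    List.zipWith (fun (tx : Int × Int) (yz : Int × Int) => (tx.1, tx.2, yz.1, yz.2))
      ((t.map (fun r => r.1)).zip
        ((List.scanl (· + ·) c1 (pvDeltas side half ((prev :: t).map (fun r => r.2.1)))).drop 1))
      (((List.scanl (· + ·) c2 (pvDeltas side half ((prev :: t).map (fun r => r.2.2.1)))).drop 1).zip
       ((List.scanl (· + ·) c3 (pvDeltas side half ((prev :: t).map (fun r => r.2.2.2)))).drop 1))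
    = pvGo side half prev c1 c2 c3 t := by
  intro t
  induction t with
  | nil => intro prev c1 c2 c3; simp [pvDeltas, pvGo, List.scanl]
  | cons c t' ih =>
    intro prev c1 c2 c3
    simp only [List.map_cons, pvDeltas_cons, List.scanl_cons, List.drop_succ_cons,
      List.drop_zero]
    rw [scanl_head_drop (· + ·) (c1 + pvWrap side half (c.2.1 - prev.2.1)),
        scanl_head_drop (· + ·) (c2 + pvWrap side half (c.2.2.1 - prev.2.2.1)),
        scanl_head_drop (· + ·) (c3 + pvWrap side half (c.2.2.2 - prev.2.2.2))]
    simp only [List.zip_cons_cons, List.zipWith_cons_cons]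
    rw [pvGo]
    congr 1
    exact ih c _ _ _

-- ===== VERDICT (by name: the statement is the Claim_ definition above) =====
theorem unwrap_coords_spec : Claim_equal_unwrap_coords := by
  intro coord_history side _
  unfold Spec_unwrap_coords
  match coord_history with
  | [] => rfl
  | [a] => rfl
  | a :: b :: t =>
    have hlen : ¬ (a :: b :: t).length < 2 := by simp
    unfold unwrap_coords unwrap_coords_alt
    rw [if_neg hlen, if_neg hlen]
    have h0 : PySem.List.pyGetD (a :: b :: t) (0 : Int) (0, 0, 0, 0) = a :=
      PySem.List.pyGetD_zero_cons ..
    rw [h0]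
    have hA := loopA side (b :: t) [] a [a] a.2.1 a.2.2.1 a.2.2.2
    simp only [List.nil_append, List.length_nil, Nat.cast_zero, zero_add] at hA
    rw [hA]
    have hB := zipB side (PySem.Int.floordiv side 2) (b :: t) a a.2.1 a.2.2.1 a.2.2.2
    simp only [List.map_cons, List.headI, List.drop_succ_cons, List.drop_zero] at hB ⊢
    rw [hB]
    simp
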